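-- pv_equiv track=rewrite | github.com/bilbisli/research_methods_parallel_DDIFMAS | CIAI_course/main.py | generate_activity_matrix
-- ===== SOURCE A (Python) =====
-- def generate_activity_matrix(O, A, T):
--     AM = []
--     for t in T:
--         row = [-1 for i in range(len(A) + 1)]
--         AM.append(row)
--     for i, row in enumerate(AM):
--         AM[i][-1] = 0
--         for j, col in enumerate(row[:-1]):
--             if j in T[i]:
--                 AM[i][j] = 1
--                 if j in O:
--                     AM[i][-1] = 1
--             else:
--                 AM[i][j] = 0
--     return AM
-- ===== SOURCE B (Python) =====
-- def generate_activity_matrix(O, A, T):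
--     n = len(A)
--     Oset = set(O)
--     res = []
--     for t in T:
--         row = [0] * n
--         flag = 0
--         for j in t:
--             if 0 <= j < n:
--                 row[j] = 1
--                 if j in Oset:
--                     flag = 1
--         row.append(flag)
--         res.append(row)
--     return res
-- ===== Notes on version B (the rewrite author's own statement) =====
-- stated objective: faster
-- what changed: A pre-fills every row with -1 and then, for every column j of every row, scans T[i] (and possibly O) for membership; B initialises each row to zeros, iterates only over the members of T[i] setting ones, and tests O-membership against a set built once.
import Mathlib
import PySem

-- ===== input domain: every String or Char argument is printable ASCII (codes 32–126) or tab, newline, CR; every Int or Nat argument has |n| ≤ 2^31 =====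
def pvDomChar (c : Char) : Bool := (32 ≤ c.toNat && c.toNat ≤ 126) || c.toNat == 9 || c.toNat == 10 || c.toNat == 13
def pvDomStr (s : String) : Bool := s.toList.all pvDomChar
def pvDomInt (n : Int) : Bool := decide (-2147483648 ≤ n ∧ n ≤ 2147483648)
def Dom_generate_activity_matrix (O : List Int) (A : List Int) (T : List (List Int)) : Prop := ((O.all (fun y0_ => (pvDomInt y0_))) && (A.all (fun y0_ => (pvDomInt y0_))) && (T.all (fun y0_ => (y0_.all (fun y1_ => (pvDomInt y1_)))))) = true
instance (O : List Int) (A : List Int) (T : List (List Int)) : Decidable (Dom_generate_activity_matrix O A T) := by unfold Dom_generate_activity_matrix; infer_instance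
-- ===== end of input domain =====

-- B replaces A's per-cell membership scans (for every column j of every row, 'j in T[i]' and possibly 'j in O')
-- by initialising each row to zeros and setting ones only at the members of T[i], with O turned into a set once.

-- ===== PORT A =====
-- one body of A's inner loop: j enumerates row[:-1]; AM[i][-1] is the last cell
def pvStepA (O t : List Int) (r : List Int) (j : Nat) : List Int :=
  if (j : Int) ∈ t then
    let r := PySem.List.pySetD r (j : Int) 1
    if (j : Int) ∈ O then PySem.List.pySetD r (-1) 1 else r
  else PySem.List.pySetD r (j : Int) 0

def generate_activity_matrix (O : List Int) (A : List Int) (T : List (List Int)) : List (List Int) :=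
  let AM := T.map (fun _t => List.replicate (A.length + 1) (-1 : Int))
  (AM.zip T).map (fun p =>
    let row := PySem.List.pySetD p.1 (-1) 0            -- AM[i][-1] = 0
    (List.range (row.length - 1)).foldl (pvStepA O p.2) row)   -- for j, col in enumerate(row[:-1])

-- ===== PORT B =====
-- one body of B's loop over t, state = (row, flag)
def pvStepB (Oset : PySem.Set Int) (n : Nat) (s : List Int × Int) (j : Int) : List Int × Int :=
  if 0 ≤ j ∧ j < (n : Int) then
    let r := s.1.set j.toNat 1
    (r, if PySem.Set.contains Oset j then 1 else s.2)
  else s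

def generate_activity_matrix_alt (O : List Int) (A : List Int) (T : List (List Int)) : List (List Int) :=
  let n := A.length
  let Oset := PySem.Set.ofList O
  T.map (fun t =>
    let s := t.foldl (pvStepB Oset n) (List.replicate n (0 : Int), (0 : Int))
    s.1 ++ [s.2])

-- ===== PRECONDITION & SPEC =====
def Spec_generate_activity_matrix (O : List Int) (A : List Int) (T : List (List Int)) (out : List (List Int)) : Prop := out = generate_activity_matrix_alt O A T
instance (O : List Int) (A : List Int) (T : List (List Int)) (out : List (List Int)) : Decidable (Spec_generate_activity_matrix O A T out) := by unfold Spec_generate_activity_matrix; infer_instance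

-- ===== CLAIM (what is proved, stated in full; the proofs are below) =====
def Claim_equal_generate_activity_matrix : Prop := ∀ (O : List Int) (A : List Int) (T : List (List Int)), Dom_generate_activity_matrix O A T → Spec_generate_activity_matrix O A T (generate_activity_matrix O A T)

-- ===== LEMMAS AND PROOFS =====

-- setting the last cell through Python's negative index
theorem pvSetLast (xs : List Int) (x v : Int) :
    PySem.List.pySetD (xs ++ [x]) (-1) v = xs ++ [v] := by
  simp [PySem.List.pySetD, PySem.List.pySet?, PySem.List.pyIdx?]

-- canonical value of one row
def pvRow (O t : List Int) (n : Nat) : List Int :=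
  (List.range n).map (fun (k : Nat) => if (k : Int) ∈ t then 1 else 0) ++
    [if ∃ j ∈ t, 0 ≤ j ∧ j < (n : Int) ∧ j ∈ O then (1 : Int) else 0]

-- A's row state after processing columns 0..m-1
def pvG (O t : List Int) (n m : Nat) : List Int :=
  (List.range n).map (fun (k : Nat) => if k < m then (if (k : Int) ∈ t then 1 else 0) else (-1 : Int)) ++
    [if ∃ j ∈ List.range m, (j : Int) ∈ t ∧ (j : Int) ∈ O then (1 : Int) else 0]

theorem pvMapRangeSet (n m : Nat) (f : Nat → Int) (v : Int) (_hm : m < n) :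
    ((List.range n).map f).set m v = (List.range n).map (fun k => if k = m then v else f k) := by
  apply List.ext_getElem
  · simp
  · intro i h1 h2
    simp only [List.getElem_set, List.getElem_map, List.getElem_range]
    split_ifs with h h' h'
    · rfl
    · omega
    · omega
    · rfl

theorem pvMapRangeCongr (n m : Nat) (t : List Int) (w : Int) (hw : ((m : Int) ∈ t → w = 1) ∧ ((m : Int) ∉ t → w = 0)) :
    (List.range n).map (fun (k : Nat) => if k = m then w else if k < m then (if (k : Int) ∈ t then 1 else 0) else (-1 : Int))
      = (List.range n).map (fun (k : Nat) => if k < m + 1 then (if (k : Int) ∈ t then 1 else 0) else (-1 : Int)) := by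
  apply List.map_congr_left
  intro k hk
  by_cases hkm : k = m
  · subst hkm
    by_cases ht : (k : Int) ∈ t
    · simp [ht, hw.1 ht]
    · simp [ht, hw.2 ht]
  · by_cases h2 : k < m
    · simp [hkm, h2, Nat.lt_succ_of_lt h2]
    · have : ¬ k < m + 1 := by omega
      simp [hkm, h2, this]

theorem pvExRangeSucc (O t : List Int) (m : Nat) :
    (∃ j ∈ List.range (m + 1), (j : Int) ∈ t ∧ (j : Int) ∈ O) ↔
      ((∃ j ∈ List.range m, (j : Int) ∈ t ∧ (j : Int) ∈ O) ∨ ((m : Int) ∈ t ∧ (m : Int) ∈ O)) := by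
  constructor
  · rintro ⟨j, hj, h1, h2⟩
    simp only [List.mem_range] at hj
    by_cases hjm : j = m
    · subst hjm; exact Or.inr ⟨h1, h2⟩
    · exact Or.inl ⟨j, by simp; omega, h1, h2⟩
  · rintro (⟨j, hj, h1, h2⟩ | ⟨h1, h2⟩)
    · exact ⟨j, by simp at hj ⊢; omega, h1, h2⟩
    · exact ⟨m, by simp, h1, h2⟩

theorem pvStepA_g (O t : List Int) (n m : Nat) (hm : m < n) :
    pvStepA O t (pvG O t n m) m = pvG O t n (m + 1) := by
  have hlen : ((List.range n).map (fun (k : Nat) => if k < m then (if (k : Int) ∈ t then 1 else 0) else (-1 : Int))).length = n := by simp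
  unfold pvStepA
  by_cases ht : (m : Int) ∈ t
  · have hset : PySem.List.pySetD (pvG O t n m) (m : Int) 1 =
        (List.range n).map (fun (k : Nat) => if k < m + 1 then (if (k : Int) ∈ t then 1 else 0) else (-1 : Int)) ++
          [if ∃ j ∈ List.range m, (j : Int) ∈ t ∧ (j : Int) ∈ O then (1 : Int) else 0] := by
      rw [PySem.List.pySetD_natCast]
      unfold pvG
      rw [List.set_append]
      simp only [hlen, hm, if_pos]
      rw [pvMapRangeSet n m _ 1 hm, pvMapRangeCongr n m t 1 ⟨fun _ => rfl, fun h => absurd ht h⟩]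
    by_cases hO : (m : Int) ∈ O
    · simp only [ht, hO, if_pos]
      rw [hset, pvSetLast]
      unfold pvG
      have : ∃ j ∈ List.range (m + 1), (j : Int) ∈ t ∧ (j : Int) ∈ O := ⟨m, by simp, ht, hO⟩
      rw [if_pos this]
    · simp only [ht, hO, if_pos, if_neg, not_false_iff]
      rw [hset]
      unfold pvG
      have : (∃ j ∈ List.range (m + 1), (j : Int) ∈ t ∧ (j : Int) ∈ O) ↔
          (∃ j ∈ List.range m, (j : Int) ∈ t ∧ (j : Int) ∈ O) := by
        rw [pvExRangeSucc]
        constructor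
        · rintro (h | ⟨_, h2⟩)
          · exact h
          · exact absurd h2 hO
        · exact Or.inl
      simp only [this]
  · simp only [ht, if_neg, not_false_iff]
    rw [PySem.List.pySetD_natCast]
    unfold pvG
    rw [List.set_append]
    simp only [hlen, hm, if_pos]
    rw [pvMapRangeSet n m _ 0 hm, pvMapRangeCongr n m t 0 ⟨fun h => absurd h ht, fun _ => rfl⟩]
    have : (∃ j ∈ List.range (m + 1), (j : Int) ∈ t ∧ (j : Int) ∈ O) ↔
        (∃ j ∈ List.range m, (j : Int) ∈ t ∧ (j : Int) ∈ O) := by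
      rw [pvExRangeSucc]
      constructor
      · rintro (h | ⟨h1, _⟩)
        · exact h
        · exact absurd h1 ht
      · exact Or.inl
    simp only [this]

theorem pvFoldA (O t : List Int) (n : Nat) :
    ∀ m, m ≤ n → (List.range m).foldl (pvStepA O t) (pvG O t n 0) = pvG O t n m := by
  intro m hm
  induction m with
  | zero => simp
  | succ m ih =>
    rw [List.range_succ, List.foldl_append, ih (by omega)]
    simpa using pvStepA_g O t n m (by omega)

theorem pvRowStart (O t : List Int) (n : Nat) :
    PySem.List.pySetD (List.replicate (n + 1) (-1 : Int)) (-1) 0 = pvG O t n 0 := by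
  have : List.replicate (n + 1) (-1 : Int) = List.replicate n (-1 : Int) ++ [(-1 : Int)] := by
    rw [← List.replicate_succ']
  rw [this, pvSetLast]
  unfold pvG
  simp

theorem pvRowA_eq (O A t : List Int) :
    (let row := PySem.List.pySetD (List.replicate (A.length + 1) (-1 : Int)) (-1) 0
     (List.range (row.length - 1)).foldl (pvStepA O t) row) = pvRow O t A.length := by
  have hlen : (PySem.List.pySetD (List.replicate (A.length + 1) (-1 : Int)) (-1) (0 : Int)).length
      = A.length + 1 := by
    rw [pvRowStart O t A.length]
    unfold pvG
    simp
  simp only [hlen, Nat.add_sub_cancel]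
  rw [pvRowStart O t A.length, pvFoldA O t A.length A.length le_rfl]
  unfold pvG pvRow
  have hmap : (List.range A.length).map (fun (k : Nat) => if k < A.length then (if (k : Int) ∈ t then 1 else 0) else (-1 : Int))
      = (List.range A.length).map (fun (k : Nat) => if (k : Int) ∈ t then (1 : Int) else 0) := by
    apply List.map_congr_left
    intro k hk
    simp only [List.mem_range] at hk
    simp [hk]
  have hiff : (∃ j ∈ List.range A.length, (j : Int) ∈ t ∧ (j : Int) ∈ O) ↔
      (∃ j ∈ t, 0 ≤ j ∧ j < (A.length : Int) ∧ j ∈ O) := by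
    constructor
    · rintro ⟨j, hj, h1, h2⟩
      simp only [List.mem_range] at hj
      exact ⟨(j : Int), h1, by positivity, by exact_mod_cast hj, h2⟩
    · rintro ⟨j, hj, h0, hn, hO⟩
      refine ⟨j.toNat, by simp; omega, ?_, ?_⟩
      · rwa [Int.toNat_of_nonneg h0]
      · rwa [Int.toNat_of_nonneg h0]
  rw [hmap]
  simp only [hiff]

-- B side invariant
theorem pvFoldB (O : List Int) (n : Nat) (t : List Int) :
    ∀ (row : List Int) (flag : Int), row.length = n →
      t.foldl (pvStepB (PySem.Set.ofList O) n) (row, flag) =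
        ((List.range n).map (fun (k : Nat) => if (k : Int) ∈ t then 1 else row.getD k 0),
         if ∃ j ∈ t, 0 ≤ j ∧ j < (n : Int) ∧ j ∈ O then (1 : Int) else flag) := by
  induction t with
  | nil =>
    intro row flag hrow
    have hex : ¬ ∃ j ∈ ([] : List Int), 0 ≤ j ∧ j < (n : Int) ∧ j ∈ O := by simp
    rw [List.foldl_nil, if_neg hex]
    simp only [Prod.mk.injEq]
    refine ⟨?_, by simp⟩
    subst hrow
    apply List.ext_getElem
    · simp
    · intro i h1 h2
      simp only [List.length_map, List.length_range] at h2
      simp [List.getD_eq_getElem?_getD, h2]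
  | cons j rest ih =>
    intro row flag hrow
    simp only [List.foldl_cons]
    by_cases hj : 0 ≤ j ∧ j < (n : Int)
    · have hstep : pvStepB (PySem.Set.ofList O) n (row, flag) j
          = (row.set j.toNat 1, if PySem.Set.contains (PySem.Set.ofList O) j then 1 else flag) := by
        unfold pvStepB
        rw [if_pos hj]
      rw [hstep, ih _ _ (by simp [hrow])]
      simp only [Prod.mk.injEq]
      constructor
      · apply List.map_congr_left
        intro k hk
        simp only [List.mem_range] at hk
        by_cases hkr : (k : Int) ∈ rest
        · simp [List.mem_cons, hkr]
        · by_cases hkj : (k : Int) = j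
          · have hcast : (j.toNat : Int) = j := Int.toNat_of_nonneg hj.1
            have hkj' : k = j.toNat := by omega
            simp only [hkr, if_neg, not_false_iff, List.mem_cons, hkj, true_or, if_pos]
            rw [List.getD_eq_getElem?_getD, hkj', List.getElem?_set_self (by omega)]
            simp
          · simp only [List.mem_cons, hkj, hkr, or_self, if_neg, not_false_iff]
            have hne : j.toNat ≠ k := by omega
            rw [List.getD_eq_getElem?_getD, List.getElem?_set_ne hne,
              ← List.getD_eq_getElem?_getD]
      · by_cases hr : ∃ j' ∈ rest, 0 ≤ j' ∧ j' < (n : Int) ∧ j' ∈ O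
        · have : ∃ j' ∈ j :: rest, 0 ≤ j' ∧ j' < (n : Int) ∧ j' ∈ O := by
            obtain ⟨j', h1, h2⟩ := hr; exact ⟨j', List.mem_cons_of_mem _ h1, h2⟩
          simp [hr, this]
        · by_cases hO : j ∈ O
          · have hc : PySem.Set.contains (PySem.Set.ofList O) j = true := by
              rw [PySem.Set.contains_iff, PySem.Set.mem_ofList]; exact hO
            have : ∃ j' ∈ j :: rest, 0 ≤ j' ∧ j' < (n : Int) ∧ j' ∈ O :=
              ⟨j, List.mem_cons_self, hj.1, hj.2, hO⟩
            simp only [hr, hc, this, if_pos]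
            simp
          · have hc : PySem.Set.contains (PySem.Set.ofList O) j = false := by
              rw [Bool.eq_false_iff, Ne, PySem.Set.contains_iff, PySem.Set.mem_ofList]
              exact hO
            have : ¬ ∃ j' ∈ j :: rest, 0 ≤ j' ∧ j' < (n : Int) ∧ j' ∈ O := by
              rintro ⟨j', hmem, h1, h2, h3⟩
              rcases List.mem_cons.mp hmem with h | h
              · subst h; exact hO h3
              · exact hr ⟨j', h, h1, h2, h3⟩
            simp only [hr, hc, this, if_neg, not_false_iff]
            simp
    · have hstep : pvStepB (PySem.Set.ofList O) n (row, flag) j = (row, flag) := by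
        unfold pvStepB
        rw [if_neg hj]
      rw [hstep, ih _ _ hrow]
      simp only [Prod.mk.injEq]
      constructor
      · apply List.map_congr_left
        intro k hk
        simp only [List.mem_range] at hk
        by_cases hkr : (k : Int) ∈ rest
        · simp [hkr, List.mem_cons]
        · have hkj : (k : Int) ≠ j := by
            intro h; apply hj; constructor <;> omega
          simp [List.mem_cons, hkj, hkr]
      · have : (∃ j' ∈ j :: rest, 0 ≤ j' ∧ j' < (n : Int) ∧ j' ∈ O) ↔
            (∃ j' ∈ rest, 0 ≤ j' ∧ j' < (n : Int) ∧ j' ∈ O) := by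
          constructor
          · rintro ⟨j', hmem, h1, h2, h3⟩
            rcases List.mem_cons.mp hmem with h | h
            · subst h; exact absurd ⟨h1, h2⟩ hj
            · exact ⟨j', h, h1, h2, h3⟩
          · rintro ⟨j', h, hs⟩; exact ⟨j', List.mem_cons_of_mem _ h, hs⟩
        simp only [this]

theorem pvRowB_eq (O : List Int) (n : Nat) (t : List Int) :
    (let s := t.foldl (pvStepB (PySem.Set.ofList O) n) (List.replicate n (0 : Int), (0 : Int))
     s.1 ++ [s.2]) = pvRow O t n := by
  rw [pvFoldB O n t _ _ (by simp)]
  unfold pvRow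
  dsimp only
  congr 1
  apply List.map_congr_left
  intro k hk
  simp only [List.mem_range] at hk
  simp [hk]

theorem pvZipConst (A : List Int) (T : List (List Int)) :
    (T.map (fun _t => List.replicate (A.length + 1) (-1 : Int))).zip T
      = T.map (fun t => (List.replicate (A.length + 1) (-1 : Int), t)) := by
  induction T with
  | nil => rfl
  | cons h tl ih => simp only [List.map_cons, List.zip_cons_cons, ih]

-- ===== VERDICT (by name: the statement is the Claim_ definition above) =====
theorem generate_activity_matrix_spec : Claim_equal_generate_activity_matrix := by
  intro O A T _
  unfold Spec_generate_activity_matrix generate_activity_matrix generate_activity_matrix_alt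
  simp only
  rw [pvZipConst, List.map_map]
  apply List.map_congr_left
  intro t _
  simp only [Function.comp]
  rw [pvRowA_eq O A t, ← pvRowB_eq O A.length t]
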